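-- pv_equiv track=rewrite | github.com/axiomchronicles/Aquilia | aquilia/db/backends/postgres.py | adapt_sql
-- ===== SOURCE A (Python) =====
-- def adapt_sql(sql: str) -> str:
--     """Convert ? placeholders to $1, $2, ... for PostgreSQL."""
--     result = []
--     param_idx = 0
--     for char in sql:
--         if char == "?":
--             param_idx += 1
--             result.append(f"${param_idx}")
--         else:
--             result.append(char)
--     return "".join(result)
-- ===== SOURCE B (Python) =====
-- def adapt_sql(sql: str) -> str:
--     parts = sql.split("?")
--     return parts[0] + "".join(f"${i}{p}" for i, p in enumerate(parts[1:], 1))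
-- ===== Notes on version B (the rewrite author's own statement) =====
-- stated objective: faster
-- what changed: B replaces A's per-character loop with a manual counter and result list by one str.split on the placeholder and an enumerate-driven join over the split segments, moving the scan into C-level string routines.
import Mathlib
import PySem

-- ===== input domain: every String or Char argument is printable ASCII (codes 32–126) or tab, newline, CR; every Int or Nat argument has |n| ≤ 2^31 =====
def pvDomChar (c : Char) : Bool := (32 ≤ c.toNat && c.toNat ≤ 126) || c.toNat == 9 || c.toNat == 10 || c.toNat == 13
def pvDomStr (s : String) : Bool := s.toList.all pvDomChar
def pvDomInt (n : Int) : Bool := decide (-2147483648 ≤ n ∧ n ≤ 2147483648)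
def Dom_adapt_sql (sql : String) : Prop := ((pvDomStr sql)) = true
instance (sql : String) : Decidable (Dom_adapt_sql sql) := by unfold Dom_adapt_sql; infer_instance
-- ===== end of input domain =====

-- B replaces A's per-character scan and counter with one split on the placeholder followed by an enumerate-join (objective: faster, measured).

-- ===== PORT A =====
-- A's loop body: append "$idx" after incrementing, or the character itself
def stepA (acc : List String × Int) (c : Char) : List String × Int :=
  if c == '?' then (acc.1 ++ ["$" ++ PySem.Int.toStr (acc.2 + 1)], acc.2 + 1)
  else (acc.1 ++ [String.singleton c], acc.2)

def adapt_sql (sql : String) : String :=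
  let st := sql.toList.foldl stepA ([], 0)
  PySem.Str.join "" st.1

-- ===== PORT B =====
-- parts = sql.split('?'); parts[0] + ''.join(f"${i}{p}" for i, p in enumerate(parts[1:], 1))
-- (parts is never empty, so parts[0] is ported as headD "")
def adapt_sql_alt (sql : String) : String :=
  let parts : List String := (PySem.Chars.splitOn sql.toList "?".toList).map String.ofList
  parts.headD "" ++
    PySem.Str.join ""
      ((PySem.List.enumerate parts.tail 1).map
        (fun ip => "$" ++ PySem.Int.toStr ip.1 ++ ip.2))

-- ===== PRECONDITION & SPEC =====
def Spec_adapt_sql (sql : String) (out : String) : Prop := out = adapt_sql_alt sql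
instance (sql : String) (out : String) : Decidable (Spec_adapt_sql sql out) := by unfold Spec_adapt_sql; infer_instance

-- ===== CLAIM (what is proved, stated in full; the proofs are below) =====
def Claim_equal_adapt_sql : Prop := ∀ (sql : String), Dom_adapt_sql sql → Spec_adapt_sql sql (adapt_sql sql)

-- ===== LEMMAS AND PROOFS =====

-- splitQ cs = cs split at '?' (structural reference form of Chars.splitOn _ ['?'])
def splitQ : List Char → List (List Char)
  | [] => [[]]
  | c :: cs =>
    match splitQ cs with
    | [] => [[]]           -- unreachable
    | p :: ps => if c == '?' then [] :: p :: ps else (c :: p) :: ps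

def prependQ (x : List Char) : List (List Char) → List (List Char)
  | [] => [x]
  | p :: ps => (x ++ p) :: ps

lemma splitQ_ne_nil (cs : List Char) : splitQ cs ≠ [] := by
  cases cs with
  | nil => simp [splitQ]
  | cons c cs =>
    simp only [splitQ]
    split
    · simp
    · split <;> simp

lemma splitOn_go_eq (fuel : Nat) (l cur : List Char) (acc : List (List Char))
    (h : l.length < fuel) :
    PySem.Chars.splitOn.go ['?'] fuel l cur acc
      = acc.reverse ++ prependQ cur.reverse (splitQ l) := by
  induction fuel generalizing l cur acc with
  | zero => omega
  | succ fuel ih =>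
    cases l with
    | nil => simp [PySem.Chars.splitOn.go, splitQ, prependQ]
    | cons c rest =>
      simp only [PySem.Chars.splitOn.go]
      by_cases hc : c = '?'
      · subst hc
        rw [if_pos (by simp)]
        rw [ih _ _ _ (by simpa using Nat.lt_of_succ_lt_succ h)]
        rcases hs : splitQ rest with _ | ⟨p, ps⟩
        · exact absurd hs (splitQ_ne_nil rest)
        · simp [splitQ, hs, prependQ]
      · rw [if_neg (by simp [List.isPrefixOf]; exact fun hh => hc hh.symm)]
        rw [ih _ _ _ (by simpa using Nat.lt_of_succ_lt_succ h)]
        have hb : (c == '?') = false := by simp [hc]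
        rcases hs : splitQ rest with _ | ⟨p, ps⟩
        · exact absurd hs (splitQ_ne_nil rest)
        · simp [splitQ, hs, prependQ, hb]

lemma splitOn_eq_splitQ (cs : List Char) :
    PySem.Chars.splitOn cs "?".toList = splitQ cs := by
  have hq : "?".toList = ['?'] := by decide
  rw [hq, PySem.Chars.splitOn, splitOn_go_eq _ _ _ _ (Nat.lt_succ_self _)]
  rcases hs : splitQ cs with _ | ⟨p, ps⟩
  · exact absurd hs (splitQ_ne_nil cs)
  · simp [prependQ]

-- the common intermediate form: the output character list, counter starting at n
def outQ (n : Int) : List Char → List Char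
  | [] => []
  | c :: cs =>
    if c == '?' then ("$" ++ PySem.Int.toStr (n + 1)).toList ++ outQ (n + 1) cs
    else c :: outQ n cs

-- A-side string list, counter starting at n
def gA (n : Int) : List Char → List String
  | [] => []
  | c :: cs =>
    if c == '?' then ("$" ++ PySem.Int.toStr (n + 1)) :: gA (n + 1) cs
    else String.singleton c :: gA n cs

lemma foldl_gA (cs : List Char) (res : List String) (n : Int) :
    cs.foldl stepA (res, n) = (res ++ gA n cs, n + (cs.count '?' : Int)) := by
  induction cs generalizing res n with
  | nil => simp [gA]
  | cons c cs ih =>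
    rw [List.foldl_cons]
    by_cases hc : c = '?'
    · subst hc
      rw [show stepA (res, n) '?' = (res ++ ["$" ++ PySem.Int.toStr (n + 1)], n + 1) from by
        simp [stepA]]
      rw [ih]
      have hcount : (List.count '?' ('?' :: cs) : Int) = (cs.count '?' : Int) + 1 := by
        simp [List.count_cons]
      refine Prod.ext ?_ ?_
      · simp [gA]
      · simp only []
        rw [hcount]; ring
    · have hb : (c == '?') = false := by simp [hc]
      rw [show stepA (res, n) c = (res ++ [String.singleton c], n) from by simp [stepA, hb]]
      rw [ih]
      refine Prod.ext ?_ ?_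
      · simp [gA, hb]
      · simp only []
        rw [show List.count '?' (c :: cs) = List.count '?' cs from by simp [List.count_cons, hc]]

lemma intercalate_nil_cons (x : List Char) (xs : List (List Char)) :
    ([] : List Char).intercalate (x :: xs) = x ++ ([] : List Char).intercalate xs := by
  cases xs <;> simp [List.intercalate]

lemma join_gA (n : Int) (cs : List Char) :
    ([] : List Char).intercalate ((gA n cs).map String.toList) = outQ n cs := by
  induction cs generalizing n with
  | nil => simp [gA, outQ, List.intercalate]
  | cons c cs ih =>
    by_cases hc : c = '?'
    · subst hc
      rw [show gA n ('?' :: cs) = ("$" ++ PySem.Int.toStr (n + 1)) :: gA (n + 1) cs from by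
        simp [gA]]
      rw [show outQ n ('?' :: cs) = ("$" ++ PySem.Int.toStr (n + 1)).toList ++ outQ (n + 1) cs from by
        simp [outQ]]
      rw [List.map_cons, intercalate_nil_cons, ih]
    · have hb : (c == '?') = false := by simp [hc]
      simp only [gA, outQ, hb, Bool.false_eq_true, if_false, List.map_cons]
      rw [intercalate_nil_cons, ih]
      simp

lemma adapt_sql_toList (sql : String) :
    (adapt_sql sql).toList = outQ 0 sql.toList := by
  simp only [adapt_sql, foldl_gA, List.nil_append]
  rw [PySem.Str.join, PySem.Chars.join]
  rw [show "".toList = ([] : List Char) from by decide]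
  simp only [String.toList_ofList]
  exact join_gA 0 sql.toList

-- B-side tail, counter starting at n
def gB (n : Int) : List (List Char) → List Char
  | [] => []
  | p :: ps => ("$" ++ PySem.Int.toStr n).toList ++ p ++ gB (n + 1) ps

lemma outQ_splitQ (n : Int) (cs : List Char) :
    outQ n cs = (splitQ cs).headD [] ++ gB (n + 1) (splitQ cs).tail := by
  induction cs generalizing n with
  | nil => simp [outQ, splitQ, gB]
  | cons c cs ih =>
    rcases hs : splitQ cs with _ | ⟨p, ps⟩
    · exact absurd hs (splitQ_ne_nil cs)
    · by_cases hc : c = '?'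
      · subst hc
        simp only [outQ, splitQ, hs, if_pos (rfl : ('?' == '?') = true)]
        rw [ih, hs]
        simp [gB]
      · have hb : (c == '?') = false := by simp [hc]
        simp only [outQ, splitQ, hs, hb, Bool.false_eq_true, if_false]
        rw [ih, hs]
        simp

lemma join_gB (n : Int) (qs : List (List Char)) :
    (PySem.Str.join ""
      ((PySem.List.enumerate (qs.map String.ofList) n).map
        (fun ip => "$" ++ PySem.Int.toStr ip.1 ++ ip.2))).toList = gB n qs := by
  induction qs generalizing n with
  | nil => simp [PySem.List.enumerate, PySem.Str.join, PySem.Chars.join, List.intercalate, gB]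
  | cons q qs ih =>
    simp only [List.map_cons, PySem.List.enumerate, List.map_cons]
    rw [PySem.Str.join, PySem.Chars.join]
    rw [show "".toList = ([] : List Char) from by decide]
    simp only [List.map_cons, String.toList_ofList]
    rw [intercalate_nil_cons]
    have hih := ih (n + 1)
    rw [PySem.Str.join, PySem.Chars.join] at hih
    rw [show "".toList = ([] : List Char) from by decide] at hih
    simp only [String.toList_ofList] at hih
    rw [gB, hih]
    simp [String.toList_append]

lemma adapt_sql_alt_toList (sql : String) :
    (adapt_sql_alt sql).toList = outQ 0 sql.toList := by
  rw [adapt_sql_alt, outQ_splitQ, splitOn_eq_splitQ]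
  rcases hs : splitQ sql.toList with _ | ⟨p, ps⟩
  · exact absurd hs (splitQ_ne_nil sql.toList)
  · simp only [List.map_cons, List.headD_cons, List.tail_cons, String.toList_append,
      String.toList_ofList]
    rw [join_gB]
    norm_num

-- ===== VERDICT (by name: the statement is the Claim_ definition above) =====
theorem adapt_sql_spec : Claim_equal_adapt_sql := by
  intro sql _
  unfold Spec_adapt_sql
  have h : (adapt_sql sql).toList = (adapt_sql_alt sql).toList := by
    rw [adapt_sql_toList, adapt_sql_alt_toList]
  exact String.toList_injective h
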